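-- pv_equiv track=rewrite | github.com/byelde/college | TG/atvd2-bfs_dfs_planaridade/planaridade.py | temK33
-- ===== SOURCE A (Python) =====
-- from typing import List, Dict, Tuple
-- from itertools import combinations
--
-- def dfs_bipartido(vertice: int, cores: Dict[int, int], cor_atual: int, adjs: List[List[int]]) -> Tuple[bool, Dict]:
--     cores[vertice] = cor_atual
--
--     for vert_vizinho in adjs[vertice]:
--         if cores[vert_vizinho] != 0:
--             if cores[vert_vizinho] == cor_atual:
--                 return False, {}
--         else:
--             if not dfs_bipartido(vert_vizinho, cores, -cor_atual, adjs)[0]: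
--                 return False, {}
--     return True, cores
--
-- def temK33(dict_graus: Dict[int, int], matriz_adj: List[List[bool]]) -> bool:
--
--     vertices_grau_3oumais: List[int] = [key for key, value in dict_graus.items() if value >= 3]
--
--     if len(vertices_grau_3oumais) < 6:
--         return False
--
--     combinacoes = list(combinations(vertices_grau_3oumais, 6))
--     grafo_gerado: List[List[int]] = []
--
--     tem_k33: bool = False
--
--     for combinacao in combinacoes:
--         grafo_gerado.clear()
--         grafo_gerado = [[] for _ in range(10)]
--         for possivel_aresta in combinations(combinacao, 2):
--             u, v = possivel_aresta
--             if matriz_adj[u][v]: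
--                 grafo_gerado[u].append(v)
--                 grafo_gerado[v].append(u)
--
--         if dfs_bipartido(0, {x:0 for x in range(10)}, 1, grafo_gerado)[0]:
--             tem_k33 = True
--             break
--
--     return tem_k33
-- ===== SOURCE B (Python) =====
-- from itertools import combinations
--
--
-- def _componente_de_zero_bipartida(seis, matriz_adj):
--     # adjacency among the six chosen vertices, kept in a dict over the ids 0..9
--     viz = {x: [] for x in range(10)}
--     for u, v in combinations(seis, 2):
--         if matriz_adj[u][v]:
--             viz[u].append(v)
--             viz[v].append(u)
--     # iterative 2-colouring of vertex 0's component with an explicit stack of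
--     # (colour, remaining-neighbours) frames instead of recursion
--     cores = {x: 0 for x in range(10)}
--     cores[0] = 1
--     pilha = [(1, list(viz[0]))]
--     while pilha:
--         cor, resto = pilha[-1]
--         if not resto:
--             pilha.pop()
--             continue
--         w = resto.pop(0)
--         if cores[w] != 0:
--             if cores[w] == cor:
--                 return False
--         else:
--             cores[w] = -cor
--             pilha.append((-cor, list(viz[w])))
--     return True
--
--
-- def temK33(dict_graus, matriz_adj):
--     candidatos = [v for v, g in dict_graus.items() if g >= 3]
--     if len(candidatos) < 6:
--         return False
--     return any(_componente_de_zero_bipartida(seis, matriz_adj)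
--                for seis in combinations(candidatos, 6))
-- ===== Notes on version B (the rewrite author's own statement) =====
-- stated objective: alternative
-- what changed: The recursive dfs_bipartido with its threaded colour dict is replaced by an inline iterative 2-colouring that drives an explicit stack of (colour, remaining-neighbours) frames, the per-combination scratch graph becomes a dict keyed by vertex id instead of an index-addressed list of lists, and the outer flag-and-break loop becomes a lazy any() over the combination generator.
import Mathlib
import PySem

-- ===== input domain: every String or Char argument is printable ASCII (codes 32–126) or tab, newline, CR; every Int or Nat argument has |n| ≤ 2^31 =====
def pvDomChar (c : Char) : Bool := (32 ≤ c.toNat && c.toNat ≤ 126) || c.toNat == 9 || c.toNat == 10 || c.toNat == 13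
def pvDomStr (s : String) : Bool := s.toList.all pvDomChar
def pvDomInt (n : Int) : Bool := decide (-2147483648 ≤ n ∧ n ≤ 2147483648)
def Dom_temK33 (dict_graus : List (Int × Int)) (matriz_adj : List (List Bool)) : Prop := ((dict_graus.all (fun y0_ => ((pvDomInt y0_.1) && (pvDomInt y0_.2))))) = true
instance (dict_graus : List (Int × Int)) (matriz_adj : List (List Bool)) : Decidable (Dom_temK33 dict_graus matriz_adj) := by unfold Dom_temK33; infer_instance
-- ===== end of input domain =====

-- B replaces the recursive 2-colouring DFS by an iterative explicit-stack colouring over a dict-of-lists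
-- scratch graph and a lazy any() over the combinations — an alternative structure, no speed claim.

-- ===== PORT A =====
-- the literal expression `matriz_adj[u][v]` (appears verbatim in both sources; total form, in range under Pre_)
def pvMat (m : List (List Bool)) (u v : Int) : Bool :=
  PySem.List.pyGetD (PySem.List.pyGetD m u []) v false

-- {x: 0 for x in range(10)}  (appears verbatim in both sources)
def pvCores0 : PySem.Dict Int Int :=
  (PySem.List.pyRange 0 10 1).foldl (fun d x => d.insert x 0) PySem.Dict.empty

-- grafo_gerado[i].append(x)  (index assignment on the size-10 list of lists)
def pvAppendAt (g : List (List Int)) (i x : Int) : List (List Int) :=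
  PySem.List.pySetD g i (PySem.List.pyGetD g i [] ++ [x])

-- grafo_gerado = [[] for _ in range(10)]; for u, v in combinations(combinacao, 2): if matriz_adj[u][v]: append both ways
def buildAdjA (comb : List Int) (m : List (List Bool)) : List (List Int) :=
  (PySem.List.combinations comb 2).foldl
    (fun g p =>
      match p with
      | [u, v] => if pvMat m u v then pvAppendAt (pvAppendAt g u v) v u else g
      | _ => g)
    (List.replicate 10 [])

-- dfs_bipartido, fuel bounds the recursion depth (the colour dict has 10 keys, so depth ≤ 11 under Pre_;
-- the fuel-0 branch is never reached there)
mutual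
def dfsBip (fuel : Nat) (vertice : Int) (cores : PySem.Dict Int Int) (corAtual : Int)
    (adjs : List (List Int)) : Bool × PySem.Dict Int Int :=
  match fuel with
  | 0 => (false, cores)
  | f + 1 =>
      dfsNeigh f (PySem.List.pyGetD adjs vertice []) (cores.insert vertice corAtual) corAtual adjs
termination_by (fuel, 0)

-- the `for vert_vizinho in adjs[vertice]` loop of dfs_bipartido
def dfsNeigh (f : Nat) (ns : List Int) (cores : PySem.Dict Int Int) (corAtual : Int)
    (adjs : List (List Int)) : Bool × PySem.Dict Int Int :=
  match ns with
  | [] => (true, cores)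
  | w :: rest =>
      if cores.getD w 0 ≠ 0 then
        if cores.getD w 0 = corAtual then (false, PySem.Dict.empty)
        else dfsNeigh f rest cores corAtual adjs
      else
        let r := dfsBip f w cores (-corAtual) adjs
        if r.1 then dfsNeigh f rest r.2 corAtual adjs
        else (false, PySem.Dict.empty)
termination_by (f, ns.length + 1)
end

-- the `for combinacao in combinacoes: … tem_k33 = True; break` loop
def loopA (combos : List (List Int)) (m : List (List Bool)) : Bool :=
  match combos with
  | [] => false
  | c :: rest =>
      if (dfsBip 11 0 pvCores0 1 (buildAdjA c m)).1 then true else loopA rest m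

def temK33 (dict_graus : List (Int × Int)) (matriz_adj : List (List Bool)) : Bool :=
  let verts := (dict_graus.filter (fun p => 3 ≤ p.2)).map Prod.fst
  if verts.length < 6 then false
  else loopA (PySem.List.combinations verts 6) matriz_adj

-- ===== PORT B =====
-- viz = {x: [] for x in range(10)}
def pvViz0 : PySem.Dict Int (List Int) :=
  (PySem.List.pyRange 0 10 1).foldl (fun d x => d.insert x []) PySem.Dict.empty

def buildVizB (seis : List Int) (m : List (List Bool)) : PySem.Dict Int (List Int) :=
  (PySem.List.combinations seis 2).foldl
    (fun d p =>
      match p with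
      | [u, v] => if pvMat m u v then (d.modify u [] (· ++ [v])).modify v [] (· ++ [u]) else d
      | _ => d)
    pvViz0

-- number of uncoloured ids in 0..9 (termination measure of the while loop)
def pvZ (cores : PySem.Dict Int Int) : Nat :=
  ((List.range 10).filter (fun i : Nat => cores.getD (i : Int) 0 = 0)).length

-- counting helper for the termination measure: flipping one element of a Nodup list out of the filter
theorem pv_countAux (p q : Nat → Bool) (t : Nat) : ∀ l : List Nat, l.Nodup → t ∈ l →
    p t = true → q t = false → (∀ i, i ≠ t → q i = p i) →
    (l.filter q).length + 1 = (l.filter p).length := by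
  intro l
  induction l with
  | nil => simp
  | cons a tl ih =>
    intro hnd hmem hp hq hpq
    rcases List.mem_cons.1 hmem with rfl | htl
    · have hnot : t ∉ tl := (List.nodup_cons.1 hnd).1
      have he : tl.filter q = tl.filter p :=
        List.filter_congr (fun i hi => hpq i (fun h => hnot (h ▸ hi)))
      simp [hp, hq, he]
    · have hrec := ih (List.nodup_cons.1 hnd).2 htl hp hq hpq
      by_cases ha : a = t
      · subst ha; exact absurd htl (List.nodup_cons.1 hnd).1
      · rw [List.filter_cons, List.filter_cons, hpq a ha]
        cases hpa : p a <;> simp [hrec]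

theorem pvZ_insert (cores : PySem.Dict Int Int) (w v : Int) (h0 : cores.getD w 0 = 0)
    (hw : 0 ≤ w) (hw' : w < 10) (hv : v ≠ 0) : pvZ (cores.insert w v) + 1 = pvZ cores := by
  unfold pvZ
  apply pv_countAux _ _ w.toNat _ List.nodup_range (List.mem_range.2 (by omega))
  · simp only [decide_eq_true_eq, Int.toNat_of_nonneg hw, h0]
  · simp [Int.toNat_of_nonneg hw, PySem.Dict.getD_insert_self, hv]
  · intro i hi
    have hne : (i : Int) ≠ w := by omega
    simp [PySem.Dict.getD_insert, hne]

-- the while loop of B; the dite guard only makes the loop total; under Pre_ the pushed vertex is a key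
-- of the colour dict and the colour is ±1, so the guard holds
def bipLoop (pilha : List (Int × List Int)) (cores : PySem.Dict Int Int)
    (viz : PySem.Dict Int (List Int)) : Bool :=
  match pilha with
  | [] => true
  | (cor, resto) :: rest =>
      match resto with
      | [] => bipLoop rest cores viz
      | w :: resto' =>
          if hcw : cores.getD w 0 ≠ 0 then
            if cores.getD w 0 = cor then false
            else bipLoop ((cor, resto') :: rest) cores viz
          else
            if hg : 0 ≤ w ∧ w < 10 ∧ cor ≠ 0 then
              bipLoop ((-cor, viz.getD w []) :: (cor, resto') :: rest) (cores.insert w (-cor)) viz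
            else false
termination_by (pvZ cores, (pilha.map (fun fr => fr.2.length)).sum + pilha.length)
decreasing_by
  · exact Prod.Lex.right _ (by simp; try omega)
  · exact Prod.Lex.right _ (by simp; try omega)
  · exact Prod.Lex.left _ _ (by
      have := pvZ_insert cores w (-cor) (by simpa using hcw) hg.1 hg.2.1 (by simpa using hg.2.2)
      omega)

def bipCheckB (seis : List Int) (m : List (List Bool)) : Bool :=
  let viz := buildVizB seis m
  bipLoop [(1, viz.getD 0 [])] (pvCores0.insert 0 1) viz

def temK33_alt (dict_graus : List (Int × Int)) (matriz_adj : List (List Bool)) : Bool :=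
  let candidatos := (dict_graus.filter (fun p => 3 ≤ p.2)).map Prod.fst
  if candidatos.length < 6 then false
  else (PySem.List.combinations candidatos 6).any (fun seis => bipCheckB seis matriz_adj)

-- ===== PRECONDITION & SPEC =====
-- Pre_ excludes (a) association lists with duplicate keys (they do not represent a Python dict) and
-- (b) inputs whose degree≥3 vertex ids fall outside the fixed size-10 scratch graph or outside the
-- adjacency matrix: there A indexes with Python's negative-index wraparound or raises
-- IndexError/KeyError depending on which component the DFS happens to reach — accidental behaviour.
def Pre_temK33 (dict_graus : List (Int × Int)) (matriz_adj : List (List Bool)) : Prop :=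
  (dict_graus.map Prod.fst).Nodup ∧
  (6 ≤ ((dict_graus.filter (fun p => 3 ≤ p.2)).map Prod.fst).length →
    (∀ k ∈ (dict_graus.filter (fun p => 3 ≤ p.2)).map Prod.fst,
        0 ≤ k ∧ k < 10 ∧ k < matriz_adj.length) ∧
    ((dict_graus.filter (fun p => 3 ≤ p.2)).map Prod.fst).Pairwise
      (fun u v => v < ((matriz_adj.getD u.toNat []).length : Int)))

instance (dict_graus : List (Int × Int)) (matriz_adj : List (List Bool)) :
    Decidable (Pre_temK33 dict_graus matriz_adj) := by unfold Pre_temK33; infer_instance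

def pvWitness_temK33 : (List (Int × Int)) × List (List Bool) :=
  ([(0, 3), (1, 3), (2, 3), (3, 4), (4, 3), (5, 3)],
   [[false, false, false, true, true, true],
    [false, false, false, true, true, true],
    [false, false, false, true, true, true],
    [true, true, true, false, false, false],
    [true, true, true, false, false, false],
    [true, true, true, false, false, false]])

def Spec_temK33 (dict_graus : List (Int × Int)) (matriz_adj : List (List Bool)) (out : Bool) : Prop := out = temK33_alt dict_graus matriz_adj
instance (dict_graus : List (Int × Int)) (matriz_adj : List (List Bool)) (out : Bool) : Decidable (Spec_temK33 dict_graus matriz_adj out) := by unfold Spec_temK33; infer_instance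

-- ===== CLAIM (what is proved, stated in full; the proofs are below) =====
def Claim_equal_temK33 : Prop := ∀ (dict_graus : List (Int × Int)) (matriz_adj : List (List Bool)), Dom_temK33 dict_graus matriz_adj → Pre_temK33 dict_graus matriz_adj → Spec_temK33 dict_graus matriz_adj (temK33 dict_graus matriz_adj)

-- ===== LEMMAS AND PROOFS =====

-- all entries of a neighbour list are ids in 0..9
def pvInR (l : List Int) : Prop := ∀ x ∈ l, 0 ≤ x ∧ x < 10

-- correspondence invariant between A's list-of-lists scratch graph and B's dict scratch graph
def pvR (g : List (List Int)) (d : PySem.Dict Int (List Int)) : Prop :=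
  g.length = 10 ∧ ∀ w : Int, 0 ≤ w → w < 10 →
    PySem.List.pyGetD g w [] = d.getD w [] ∧ pvInR (d.getD w [])

theorem pv_append_one (g : List (List Int)) (d : PySem.Dict Int (List Int)) (h : pvR g d)
    (i x : Int) (hi : 0 ≤ i ∧ i < 10) (hx : 0 ≤ x ∧ x < 10) :
    pvR (pvAppendAt g i x) (d.modify i [] (· ++ [x])) := by
  have hlen : g.length = 10 := h.1
  have hset : pvAppendAt g i x = PySem.List.pySetD g ((i.toNat : Nat) : Int) (PySem.List.pyGetD g i [] ++ [x]) := by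
    unfold pvAppendAt
    rw [Int.toNat_of_nonneg hi.1]
  constructor
  · rw [hset, PySem.List.pySetD_natCast]
    simpa using hlen
  · intro w hw hw'
    have hiw : i.toNat < g.length := by omega
    have hwi : w = ((w.toNat : Nat) : Int) := (Int.toNat_of_nonneg hw).symm
    rw [hset, hwi, PySem.List.pyGetD_pySetD_natCast _ _ _ _ _ hiw,
      PySem.Dict.getD_modify]
    by_cases hwe : w.toNat = i.toNat
    · rw [if_pos hwe, if_pos (by omega), (h.2 i hi.1 hi.2).1]
      refine ⟨rfl, ?_⟩
      intro y hy
      rcases List.mem_append.1 hy with hy | hy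
      · exact (h.2 i hi.1 hi.2).2 y hy
      · simp at hy; omega
    · rw [if_neg hwe, if_neg (by omega), ← hwi]
      exact h.2 w hw hw'

theorem pv_fold (m : List (List Bool)) :
    ∀ L : List (List Int),
      (∀ p ∈ L, ∀ u v : Int, p = [u, v] → (0 ≤ u ∧ u < 10) ∧ (0 ≤ v ∧ v < 10)) →
      ∀ g d, pvR g d →
      pvR (L.foldl (fun g p =>
            match p with
            | [u, v] => if pvMat m u v then pvAppendAt (pvAppendAt g u v) v u else g
            | _ => g) g)
          (L.foldl (fun d p =>
            match p with
            | [u, v] => if pvMat m u v then (d.modify u [] (· ++ [v])).modify v [] (· ++ [u]) else d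
            | _ => d) d) := by
  intro L
  induction L with
  | nil => intro _ g d h; exact h
  | cons p tl ih =>
      intro hmem g d h
      have htl := fun q hq => hmem q (List.mem_cons_of_mem _ hq)
      rcases p with _ | ⟨u, _ | ⟨v, _ | ⟨z, zs⟩⟩⟩
      · exact ih htl g d h
      · exact ih htl g d h
      · -- p = [u, v]
        have huv := hmem [u, v] (by simp) u v rfl
        cases hM : pvMat m u v with
        | true =>
          have h1 : pvR (pvAppendAt g u v) (d.modify u [] (· ++ [v])) :=
            pv_append_one g d h u v huv.1 huv.2
          have h2 : pvR (pvAppendAt (pvAppendAt g u v) v u)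
              ((d.modify u [] (· ++ [v])).modify v [] (· ++ [u])) :=
            pv_append_one _ _ h1 v u huv.2 huv.1
          simpa only [List.foldl_cons, hM, if_true] using ih htl _ _ h2
        | false =>
          simpa only [List.foldl_cons, hM, Bool.false_eq_true, if_false] using ih htl g d h
      · exact ih htl g d h

theorem pv_init : pvR (List.replicate 10 []) pvViz0 := by
  constructor
  · simp
  · intro w hw hw'
    have hnil : pvViz0.getD w [] = [] := by
      interval_cases w <;> decide
    have hga : PySem.List.pyGetD (List.replicate 10 ([] : List Int)) w [] = [] := by
      interval_cases w <;> decide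
    rw [hnil, hga]
    exact ⟨rfl, fun y hy => by simp at hy⟩

-- the two scratch graphs agree and hold in-range ids only
theorem pv_build_eq (comb : List Int) (m : List (List Bool))
    (hc : ∀ x ∈ comb, 0 ≤ x ∧ x < 10) :
    (∀ w : Int, 0 ≤ w → w < 10 →
        PySem.List.pyGetD (buildAdjA comb m) w [] = (buildVizB comb m).getD w [] ∧
        pvInR ((buildVizB comb m).getD w [])) := by
  have hmem : ∀ p ∈ PySem.List.combinations comb 2, ∀ u v : Int, p = [u, v] →
      (0 ≤ u ∧ u < 10) ∧ (0 ≤ v ∧ v < 10) := by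
    intro p hp u v hpe
    have hsub := (PySem.List.mem_combinations_iff comb 2 p).1 hp
    have hu : u ∈ comb := hsub.1.subset (by simp [hpe])
    have hv : v ∈ comb := hsub.1.subset (by simp [hpe])
    exact ⟨hc u hu, hc v hv⟩
  exact (pv_fold m (PySem.List.combinations comb 2) hmem _ _ pv_init).2

-- simulation: the explicit stack machine computes exactly what the recursive DFS computes
theorem pv_sim (adjs : List (List Int)) (viz : PySem.Dict Int (List Int))
    (h1 : ∀ w : Int, 0 ≤ w → w < 10 → PySem.List.pyGetD adjs w [] = viz.getD w [])
    (h2 : ∀ w : Int, 0 ≤ w → w < 10 → pvInR (viz.getD w [])) :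
    ∀ f ns cores c, pvZ cores < f → (c = 1 ∨ c = -1) → pvInR ns →
      (∀ rest, bipLoop ((c, ns) :: rest) cores viz =
          (if (dfsNeigh f ns cores c adjs).1 then bipLoop rest (dfsNeigh f ns cores c adjs).2 viz
           else false)) ∧
      ((dfsNeigh f ns cores c adjs).1 = true → pvZ (dfsNeigh f ns cores c adjs).2 ≤ pvZ cores) := by
  intro f
  induction f using Nat.strong_induction_on with
  | _ f IHf =>
  intro ns
  induction ns with
  | nil =>
      intro cores c hZ hc hns
      constructor
      · intro rest
        rw [bipLoop]
        simp [dfsNeigh]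
      · intro _
        simp [dfsNeigh]
  | cons w tl IH =>
      intro cores c hZ hc hns
      have hw := hns w (by simp)
      have htl : pvInR tl := fun x hx => hns x (by simp [hx])
      by_cases h0 : cores.getD w 0 = 0
      · -- uncoloured neighbour: recurse / push
        have hcne : -c ≠ 0 := by rcases hc with rfl | rfl <;> decide
        have hzi := pvZ_insert cores w (-c) h0 hw.1 hw.2 hcne
        obtain ⟨g, rfl⟩ : ∃ g, f = g + 1 := ⟨f - 1, by omega⟩
        have hnsw : pvInR (PySem.List.pyGetD adjs w []) := by
          rw [h1 w hw.1 hw.2]; exact h2 w hw.1 hw.2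
        have hIH1 := IHf g (by omega) (PySem.List.pyGetD adjs w [])
          (cores.insert w (-c)) (-c) (by omega)
          (by rcases hc with rfl | rfl <;> simp) hnsw
        have hr : dfsBip (g + 1) w cores (-c) adjs =
            dfsNeigh g (PySem.List.pyGetD adjs w []) (cores.insert w (-c)) (-c) adjs := by
          rw [dfsBip]
        by_cases hok : (dfsBip (g + 1) w cores (-c) adjs).1 = true
        · -- sub-DFS succeeded, continue with the rest of the neighbours
          have hZ2 : (dfsBip (g + 1) w cores (-c) adjs).2 =
              (dfsNeigh g (PySem.List.pyGetD adjs w []) (cores.insert w (-c)) (-c) adjs).2 := by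
            rw [hr]
          have hzle : pvZ (dfsBip (g + 1) w cores (-c) adjs).2 ≤ pvZ cores - 1 := by
            rw [hZ2]; have := hIH1.2 (by rw [← hr]; exact hok); omega
          have hIH2 := IH (dfsBip (g + 1) w cores (-c) adjs).2 c (by omega) hc htl
          have hguard : 0 ≤ w ∧ w < 10 ∧ c ≠ 0 :=
            ⟨hw.1, hw.2, by rcases hc with rfl | rfl <;> decide⟩
          constructor
          · intro rest
            rw [bipLoop, dif_neg (not_not_intro h0), dif_pos hguard]
            rw [← h1 w hw.1 hw.2]
            rw [hIH1.1 ((c, tl) :: rest), ← hr, if_pos hok]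
            rw [hIH2.1 rest]
            simp [dfsNeigh, h0, hok]
          · intro hok2
            have hA : dfsNeigh (g + 1) (w :: tl) cores c adjs =
                dfsNeigh (g + 1) tl (dfsBip (g + 1) w cores (-c) adjs).2 c adjs := by
              simp only [dfsNeigh]
              rw [if_neg (not_not_intro h0)]
              simp only [if_pos hok]
            rw [hA] at hok2 ⊢
            have := hIH2.2 hok2
            omega
        · -- sub-DFS failed: everything is False
          have hguard : 0 ≤ w ∧ w < 10 ∧ c ≠ 0 :=
            ⟨hw.1, hw.2, by rcases hc with rfl | rfl <;> decide⟩
          constructor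
          · intro rest
            rw [bipLoop, dif_neg (not_not_intro h0), dif_pos hguard]
            rw [← h1 w hw.1 hw.2]
            rw [hIH1.1 ((c, tl) :: rest), ← hr]
            simp [dfsNeigh, h0, hok]
          · intro habs
            simp [dfsNeigh, h0, hok] at habs
      · -- already coloured neighbour
        by_cases hcc : cores.getD w 0 = c
        · have hA : dfsNeigh f (w :: tl) cores c adjs = (false, PySem.Dict.empty) := by
            simp only [dfsNeigh]
            rw [if_pos h0, if_pos hcc]
          constructor
          · intro rest
            rw [bipLoop, dif_pos h0, if_pos hcc, hA]
            simp
          · intro habs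
            rw [hA] at habs
            simp at habs
        · have hIH2 := IH cores c hZ hc htl
          have hA : dfsNeigh f (w :: tl) cores c adjs = dfsNeigh f tl cores c adjs := by
            simp only [dfsNeigh]
            rw [if_pos h0, if_neg hcc]
          constructor
          · intro rest
            rw [bipLoop, dif_pos h0, if_neg hcc, hIH2.1 rest, hA]
          · intro h
            rw [hA] at h ⊢
            exact hIH2.2 h

-- per-combination agreement
theorem pv_combo (comb : List Int) (m : List (List Bool)) (hc : ∀ x ∈ comb, 0 ≤ x ∧ x < 10) :
    (dfsBip 11 0 pvCores0 1 (buildAdjA comb m)).1 = bipCheckB comb m := by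
  have hbe := pv_build_eq comb m hc
  have h1 : ∀ w : Int, 0 ≤ w → w < 10 →
      PySem.List.pyGetD (buildAdjA comb m) w [] = (buildVizB comb m).getD w [] :=
    fun w hw hw' => (hbe w hw hw').1
  have h2 : ∀ w : Int, 0 ≤ w → w < 10 → pvInR ((buildVizB comb m).getD w []) :=
    fun w hw hw' => (hbe w hw hw').2
  have hunf : dfsBip 11 0 pvCores0 1 (buildAdjA comb m) =
      dfsNeigh 10 (PySem.List.pyGetD (buildAdjA comb m) 0 []) (pvCores0.insert 0 1) 1
        (buildAdjA comb m) := by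
    rw [show (11 : Nat) = 10 + 1 from rfl, dfsBip]
  have hZ : pvZ (pvCores0.insert 0 1) < 10 := by decide
  have hns : pvInR (PySem.List.pyGetD (buildAdjA comb m) 0 []) := by
    rw [h1 0 le_rfl (by norm_num)]
    exact h2 0 le_rfl (by norm_num)
  have hsim := (pv_sim (buildAdjA comb m) (buildVizB comb m) h1 h2 10
      (PySem.List.pyGetD (buildAdjA comb m) 0 []) (pvCores0.insert 0 1) 1 hZ (Or.inl rfl) hns).1 []
  have hBC : bipCheckB comb m =
      bipLoop [(1, (buildVizB comb m).getD 0 [])] (pvCores0.insert 0 1) (buildVizB comb m) := rfl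
  rw [hBC, ← h1 0 le_rfl (by norm_num), hsim, hunf]
  rcases (dfsNeigh 10 (PySem.List.pyGetD (buildAdjA comb m) 0 []) (pvCores0.insert 0 1) 1
      (buildAdjA comb m)).1 with _ | _ <;> simp [bipLoop]

theorem pv_loopA_any (combos : List (List Int)) (m : List (List Bool))
    (h : ∀ c ∈ combos, (dfsBip 11 0 pvCores0 1 (buildAdjA c m)).1 = bipCheckB c m) :
    loopA combos m = combos.any (fun c => bipCheckB c m) := by
  induction combos with
  | nil => simp [loopA]
  | cons c rest ih =>
      have hc := h c (by simp)
      simp only [loopA, List.any_cons, hc]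
      rcases hb : bipCheckB c m with _ | _
      · simpa using ih (fun c hcm => h c (List.mem_cons_of_mem _ hcm))
      · simp

-- ===== VERDICT (by name: the statement is the Claim_ definition above) =====
theorem temK33_spec : Claim_equal_temK33 := by
  intro dict_graus matriz_adj _hdom hpre
  unfold Spec_temK33 temK33 temK33_alt
  dsimp only
  by_cases hlen : ((dict_graus.filter (fun p => 3 ≤ p.2)).map Prod.fst).length < 6
  · rw [if_pos hlen, if_pos hlen]
  · rw [if_neg hlen, if_neg hlen]
    apply pv_loopA_any
    intro c hcmem
    apply pv_combo
    intro x hx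
    have hsub := ((PySem.List.mem_combinations_iff _ 6 c).1 hcmem).1
    have hxv := hsub.subset hx
    have := (hpre.2 (by omega)).1 x hxv
    exact ⟨this.1, this.2.1⟩
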